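-- pv_equiv track=rewrite | github.com/gabriel-david-orozco/TSN-CNC-CUC-UPC | CNC/Microservices/Random_generator_microservice/RanNet_Generator.py | Matrix_Validator
-- ===== SOURCE A (Python) =====
-- def allcmp(existing_indicator) :
--     for item in existing_indicator :
--         if item == 0 :
--             return False
--     return True
--
-- def Matrix_Validator(element_list):
--     existing_indicator = [0 for i in range(len(element_list[0]))]
--     x = 0
--     for element in element_list :
--         y = 0
--         for element_2 in element :
--             existing_indicator[y] = existing_indicator[y] + element_2
--             y = y +1
--         x = x +1
--     return allcmp(existing_indicator)
-- ===== SOURCE B (Python) =====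
-- def Matrix_Validator(element_list):
--     ncols = len(element_list[0])
--     return all(
--         sum(row[c] for row in element_list if c < len(row)) != 0
--         for c in range(ncols)
--     )
-- ===== Notes on version B (the rewrite author's own statement) =====
-- stated objective: alternative
-- what changed: Replaces the row-major accumulation into a preallocated indicator array (plus the hand-written allcmp scan) with a column-major reduction: for each column index, sum that column with a generator over the rows (skipping rows too short to reach it) and test all(... != 0).
import Mathlib
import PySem

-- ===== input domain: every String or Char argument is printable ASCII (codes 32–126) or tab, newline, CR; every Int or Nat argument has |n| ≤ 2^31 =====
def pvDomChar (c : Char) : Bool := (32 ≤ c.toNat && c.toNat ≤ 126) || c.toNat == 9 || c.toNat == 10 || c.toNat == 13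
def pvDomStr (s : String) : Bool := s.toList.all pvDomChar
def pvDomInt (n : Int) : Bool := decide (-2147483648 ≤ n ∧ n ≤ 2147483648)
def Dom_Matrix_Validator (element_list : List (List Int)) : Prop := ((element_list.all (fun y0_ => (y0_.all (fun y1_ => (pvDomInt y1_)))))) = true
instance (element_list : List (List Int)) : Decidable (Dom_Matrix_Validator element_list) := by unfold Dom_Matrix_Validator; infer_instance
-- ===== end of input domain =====

-- B replaces A's row-major accumulation into a preallocated indicator array (plus the
-- hand-written allcmp scan) by a column-major reduction: each column is summed on its own
-- and the nonzero tests are combined with all(...); same cost, different traversal order.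

-- ===== PORT A =====
-- helper allcmp, step for step
def pvAllcmp : List Int → Bool
  | [] => true
  | item :: rest => if item == 0 then false else pvAllcmp rest

-- inner-loop step: existing_indicator[y] = existing_indicator[y] + element_2; y = y + 1
def pvAddStep : List Int × Nat → Int → List Int × Nat
  | (ind, y), e => (ind.set y (ind.getD y 0 + e), y + 1)

-- Literal port of A (the dead counter x is omitted; within Pre_ every index y is in
-- range, so List.set/getD compute exactly Python's ind[y] accesses).
def Matrix_Validator (element_list : List (List Int)) : Bool :=
  let ind0 : List Int := List.replicate element_list.headI.length 0
  let ind := element_list.foldl (fun ind row => (row.foldl pvAddStep (ind, 0)).1) ind0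
  pvAllcmp ind

-- ===== PORT B =====
-- per-column sum: sum(row[c] for row in element_list if c < len(row))
def pvColSum (element_list : List (List Int)) (c : Nat) : Int :=
  ((element_list.filter (fun row => decide (c < row.length))).map (fun row => row.getD c 0)).sum

def Matrix_Validator_alt (element_list : List (List Int)) : Bool :=
  let ncols := element_list.headI.length
  (List.range ncols).all (fun c => pvColSum element_list c != 0)

-- ===== PRECONDITION & SPEC =====
-- Pre_ is exactly where A returns normally: A raises IndexError on the empty list
-- (element_list[0]) and whenever some row is longer than the first row (the write
-- existing_indicator[y] then runs off the end of the indicator array).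
def Pre_Matrix_Validator (element_list : List (List Int)) : Prop :=
  element_list ≠ [] ∧ ∀ r ∈ element_list, r.length ≤ element_list.headI.length
instance (element_list : List (List Int)) : Decidable (Pre_Matrix_Validator element_list) := by
  unfold Pre_Matrix_Validator; infer_instance

def pvWitness_Matrix_Validator : List (List Int) := [[1, 2], [3, 4]]

def Spec_Matrix_Validator (element_list : List (List Int)) (out : Bool) : Prop := out = Matrix_Validator_alt element_list
instance (element_list : List (List Int)) (out : Bool) : Decidable (Spec_Matrix_Validator element_list out) := by unfold Spec_Matrix_Validator; infer_instance

-- ===== CLAIM (what is proved, stated in full; the proofs are below) =====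
def Claim_equal_Matrix_Validator : Prop := ∀ (element_list : List (List Int)), Dom_Matrix_Validator element_list → Pre_Matrix_Validator element_list → Spec_Matrix_Validator element_list (Matrix_Validator element_list)

-- ===== LEMMAS AND PROOFS =====

-- what one row does to the indicator: pointwise addition on the prefix it covers
def pvAddPartial (ind row : List Int) : List Int :=
  List.zipWith (· + ·) ind row ++ ind.drop row.length

theorem pvAllcmp_eq_all (l : List Int) : pvAllcmp l = l.all (fun x => x != 0) := by
  induction l with
  | nil => rfl
  | cons x xs ih =>
      by_cases h : x = 0 <;> simp [pvAllcmp, h, ih]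

theorem pvAddPartial_length (ind row : List Int) (h : row.length ≤ ind.length) :
    (pvAddPartial ind row).length = ind.length := by
  simp [pvAddPartial]
  omega

-- the inner foldl of A adds the row pointwise onto the indicator suffix it indexes into
theorem pvInner_fold (row : List Int) : ∀ (pre rest : List Int), row.length ≤ rest.length →
    (row.foldl pvAddStep (pre ++ rest, pre.length)).1 = pre ++ pvAddPartial rest row := by
  induction row with
  | nil =>
      intro pre rest _
      simp [pvAddPartial]
  | cons e row' ih =>
      intro pre rest h
      cases rest with
      | nil => simp at h
      | cons a rest' =>
          have hget : (pre ++ a :: rest').getD pre.length 0 = a := by simp [List.getD]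
          have hset : (pre ++ a :: rest').set pre.length (a + e) = pre ++ (a + e) :: rest' := by
            simp
          have hlen : row'.length ≤ rest'.length := by simpa using h
          have hih := ih (pre ++ [a + e]) rest' hlen
          simp only [List.foldl_cons, pvAddStep, hget, hset]
          rw [show pre.length + 1 = (pre ++ [a + e]).length by simp]
          rw [show pre ++ (a + e) :: rest' = (pre ++ [a + e]) ++ rest' by simp]
          rw [hih]
          simp [pvAddPartial]

-- A's outer fold is a fold of the partial pointwise additions
theorem pvA_fold (rows : List (List Int)) : ∀ (acc : List Int), (∀ r ∈ rows, r.length ≤ acc.length) →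
    rows.foldl (fun ind row => (row.foldl pvAddStep (ind, 0)).1) acc = rows.foldl pvAddPartial acc := by
  induction rows with
  | nil => intro acc _; rfl
  | cons r rs ih =>
      intro acc h
      have hr : r.length ≤ acc.length := h r (by simp)
      have h1 : (r.foldl pvAddStep (acc, 0)).1 = pvAddPartial acc r := by
        simpa using pvInner_fold r [] acc hr
      rw [List.foldl_cons, List.foldl_cons, h1]
      apply ih
      intro r' hr'
      rw [pvAddPartial_length acc r hr]
      exact h r' (by simp [hr'])

theorem pvFold_length (rows : List (List Int)) : ∀ (acc : List Int), (∀ r ∈ rows, r.length ≤ acc.length) →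
    (rows.foldl pvAddPartial acc).length = acc.length := by
  induction rows with
  | nil => intro acc _; rfl
  | cons r rs ih =>
      intro acc h
      have hr : r.length ≤ acc.length := h r (by simp)
      rw [List.foldl_cons]
      rw [ih (pvAddPartial acc r) (by intro r' hr'; rw [pvAddPartial_length acc r hr]; exact h r' (by simp [hr']))]
      exact pvAddPartial_length acc r hr

-- elementwise reading of one partial addition
theorem pvAddPartial_getD (row : List Int) : ∀ (ind : List Int) (j : Nat),
    row.length ≤ ind.length → j < ind.length →
    (pvAddPartial ind row).getD j 0 =
      ind.getD j 0 + (if j < row.length then row.getD j 0 else 0) := by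
  induction row with
  | nil =>
      intro ind j _ _
      simp [pvAddPartial]
  | cons e row' ih =>
      intro ind j hle hj
      cases ind with
      | nil => simp at hle
      | cons a ind' =>
          have hstep : pvAddPartial (a :: ind') (e :: row') = (a + e) :: pvAddPartial ind' row' := by
            simp [pvAddPartial]
          rw [hstep]
          cases j with
          | zero => simp
          | succ j' =>
              have hle' : row'.length ≤ ind'.length := by simpa using hle
              have hj' : j' < ind'.length := by simpa using hj
              simpa [List.getD_cons_succ, Nat.succ_lt_succ_iff] using ih ind' j' hle' hj'

-- elementwise reading of the whole fold: start value plus the column sum over the rows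
-- that reach column j (exactly B's pvColSum)
theorem pvFold_getD (rows : List (List Int)) : ∀ (acc : List Int) (j : Nat),
    (∀ r ∈ rows, r.length ≤ acc.length) → j < acc.length →
    (rows.foldl pvAddPartial acc).getD j 0 = acc.getD j 0 + pvColSum rows j := by
  induction rows with
  | nil => intro acc j _ _; simp [pvColSum]
  | cons r rs ih =>
      intro acc j h hj
      have hr : r.length ≤ acc.length := h r (by simp)
      have hlen : (pvAddPartial acc r).length = acc.length := pvAddPartial_length acc r hr
      rw [List.foldl_cons]
      rw [ih (pvAddPartial acc r) j
            (by intro r' hr'; rw [hlen]; exact h r' (by simp [hr'])) (by omega)]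
      rw [pvAddPartial_getD r acc j hr hj]
      by_cases hc : j < r.length <;>
        simp [pvColSum, hc, add_assoc]

-- bridge from an elementwise description of a list to the all-over-range test B performs
theorem pvAll_getD (l : List Int) (n : Nat) (f : Nat → Int)
    (hlen : l.length = n) (h : ∀ j, j < n → l.getD j 0 = f j) :
    l.all (fun x => x != 0) = (List.range n).all (fun j => f j != 0) := by
  rw [Bool.eq_iff_iff]
  simp only [List.all_eq_true, List.mem_range, bne_iff_ne, ne_eq]
  constructor
  · intro hall j hj
    have := hall (l.getD j 0) (by
      have : j < l.length := by omega
      rw [List.getD_eq_getElem l 0 this]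
      exact List.getElem_mem this)
    rwa [h j hj] at this
  · intro hall x hx
    obtain ⟨j, hj, rfl⟩ := List.mem_iff_getElem.mp hx
    have hjn : j < n := by omega
    have := hall j hjn
    rwa [← h j hjn, List.getD_eq_getElem l 0 hj] at this

-- ===== VERDICT (by name: the statement is the Claim_ definition above) =====
theorem Matrix_Validator_spec : Claim_equal_Matrix_Validator := by
  unfold Claim_equal_Matrix_Validator
  intro el _ hpre
  obtain ⟨hne, hbnd⟩ := hpre
  show Matrix_Validator el = Matrix_Validator_alt el
  set n := el.headI.length with hn
  show pvAllcmp (el.foldl (fun ind row => (row.foldl pvAddStep (ind, 0)).1) (List.replicate n 0)) =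
    (List.range n).all (fun c => pvColSum el c != 0)
  have hbnd' : ∀ r ∈ el, r.length ≤ (List.replicate n (0 : Int)).length := by
    intro r hr; simpa using hbnd r hr
  rw [pvA_fold el (List.replicate n 0) hbnd']
  rw [pvAllcmp_eq_all]
  apply pvAll_getD
  · rw [pvFold_length el (List.replicate n 0) hbnd']; simp
  · intro j hj
    rw [pvFold_getD el (List.replicate n 0) j hbnd' (by simpa using hj)]
    simp
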